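-- pv_equiv track=rewrite | github.com/lucascarsonbrown/Poker | training/postflop_trainer.py | _get_pot_size
-- ===== SOURCE A (Python) =====
-- from typing import List
--
-- def _get_pot_size(history: List[str]) -> tuple:
--     total = 0
--     stage_total = 4  # Preflop: BB + SB
--     latest_bet = 0
--
--     for action in history:
--         if action == "/":
--             total += stage_total
--             stage_total = 0
--             latest_bet = 0
--         elif action == "bMIN":
--             latest_bet = max(2, total // 3)
--             stage_total += latest_bet
--         elif action == "bMAX":
--             latest_bet = total
--             stage_total += latest_bet
--         elif action == "c":
--             stage_total = 2 * latest_bet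
--
--     total += stage_total
--     return total, latest_bet
-- ===== SOURCE B (Python) =====
-- from typing import List
--
-- def _run_stage(total, stage_total, seg):
--     latest_bet = 0
--     for action in seg:
--         if action == "bMIN":
--             latest_bet = max(2, total // 3)
--             stage_total += latest_bet
--         elif action == "bMAX":
--             latest_bet = total
--             stage_total += latest_bet
--         elif action == "c":
--             stage_total = 2 * latest_bet
--     return total + stage_total, latest_bet
--
-- def _get_pot_size(history: List[str]) -> tuple:
--     # Split on "/" into stage segments, then run each stage against the
--     # pot total frozen at the start of the stage.
--     segs = [[]]
--     for action in history:
--         if action == "/":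
--             segs.append([])
--         else:
--             segs[-1].append(action)
--     total, latest_bet = _run_stage(0, 4, segs[0])
--     for seg in segs[1:]:
--         total, latest_bet = _run_stage(total, 0, seg)
--     return total, latest_bet
-- ===== Notes on version B (the rewrite author's own statement) =====
-- stated objective: alternative
-- what changed: B splits the history on '/' into per-stage segments and runs a separate stage helper over each segment against the pot total frozen at stage start, instead of A's single loop with an inline '/' branch mutating three state variables.
import Mathlib
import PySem

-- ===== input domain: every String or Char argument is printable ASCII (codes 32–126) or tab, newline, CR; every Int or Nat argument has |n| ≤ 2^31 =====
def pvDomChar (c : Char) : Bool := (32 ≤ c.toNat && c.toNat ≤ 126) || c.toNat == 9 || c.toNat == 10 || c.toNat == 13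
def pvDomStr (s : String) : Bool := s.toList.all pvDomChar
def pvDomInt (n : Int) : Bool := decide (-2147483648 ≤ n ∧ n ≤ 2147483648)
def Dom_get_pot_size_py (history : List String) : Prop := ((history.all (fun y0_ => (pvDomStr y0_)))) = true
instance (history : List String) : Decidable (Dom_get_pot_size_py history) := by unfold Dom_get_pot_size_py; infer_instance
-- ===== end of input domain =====

-- B splits the history on "/" into stage segments and runs a stage helper per segment; same return value as A.

-- ===== PORT A =====
-- one step of A's loop; state is (total, stage_total, latest_bet)
def potStepA (s : Int × Int × Int) (action : String) : Int × Int × Int :=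
  if action = "/" then (s.1 + s.2.1, 0, 0)
  else if action = "bMIN" then
    let lb := max 2 (PySem.Int.floordiv s.1 3)
    (s.1, s.2.1 + lb, lb)
  else if action = "bMAX" then (s.1, s.2.1 + s.1, s.1)
  else if action = "c" then (s.1, 2 * s.2.2, s.2.2)
  else s

def get_pot_size_py (history : List String) : Int × Int :=
  let r := history.foldl potStepA (0, 4, 0)
  (r.1 + r.2.1, r.2.2)

-- ===== PORT B =====
-- one action inside a stage; `total` is frozen; state is (stage_total, latest_bet)
def stageStep (total : Int) (s : Int × Int) (action : String) : Int × Int :=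
  if action = "bMIN" then
    let lb := max 2 (PySem.Int.floordiv total 3)
    (s.1 + lb, lb)
  else if action = "bMAX" then (s.1 + total, total)
  else if action = "c" then (2 * s.2, s.2)
  else s

-- _run_stage: returns (new total, latest_bet of this stage)
def runStage (total stage_total : Int) (seg : List String) : Int × Int :=
  let r := seg.foldl (stageStep total) (stage_total, 0)
  (total + r.1, r.2)

def get_pot_size_py_alt (history : List String) : Int × Int :=
  let p := history.foldl
    (fun (s : List (List String) × List String) action =>
      if action = "/" then (s.1 ++ [s.2], []) else (s.1, s.2 ++ [action]))
    ([], [])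
  let segs := p.1 ++ [p.2]
  let first := runStage 0 4 (segs.headD [])
  segs.tail.foldl (fun s seg => runStage s.1 0 seg) first

-- ===== PRECONDITION & SPEC =====
def Spec_get_pot_size_py (history : List String) (out : Int × Int) : Prop := out = get_pot_size_py_alt history
instance (history : List String) (out : Int × Int) : Decidable (Spec_get_pot_size_py history out) := by unfold Spec_get_pot_size_py; infer_instance

-- ===== CLAIM (what is proved, stated in full; the proofs are below) =====
def Claim_equal_get_pot_size_py : Prop := ∀ (history : List String), Dom_get_pot_size_py history → Spec_get_pot_size_py history (get_pot_size_py history)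

-- ===== LEMMAS AND PROOFS =====

-- structural split on "/" (proof-side reference; always nonempty)
def splitS : List String → List (List String)
  | [] => [[]]
  | a :: rest =>
    if a = "/" then [] :: splitS rest
    else
      match splitS rest with
      | [] => [[a]]
      | s :: ss => (a :: s) :: ss

theorem splitS_ne_nil (h : List String) : splitS h ≠ [] := by
  cases h with
  | nil => simp [splitS]
  | cons a rest =>
    simp only [splitS]
    split
    · simp
    · cases splitS rest <;> simp

-- B's accumulator split equals the structural split
theorem splitAcc_eq (h : List String) :
    ∀ (done : List (List String)) (cur : List String),
      ((h.foldl
        (fun (s : List (List String) × List String) action =>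
          if action = "/" then (s.1 ++ [s.2], []) else (s.1, s.2 ++ [action]))
        (done, cur)).1 ++ [(h.foldl
        (fun (s : List (List String) × List String) action =>
          if action = "/" then (s.1 ++ [s.2], []) else (s.1, s.2 ++ [action]))
        (done, cur)).2]) =
      done ++ (match splitS h with
               | [] => [cur]
               | s :: ss => (cur ++ s) :: ss) := by
  induction h with
  | nil => intro done cur; simp [splitS]
  | cons a rest ih =>
    intro done cur
    by_cases ha : a = "/"
    · simp only [List.foldl_cons, ha, splitS, reduceIte]
      rw [ih (done ++ [cur]) []]
      cases hs : splitS rest with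
      | nil => exact absurd hs (splitS_ne_nil rest)
      | cons s ss => simp
    · simp only [List.foldl_cons, if_neg ha, splitS]
      rw [ih done (cur ++ [a])]
      cases hs : splitS rest with
      | nil => exact absurd hs (splitS_ne_nil rest)
      | cons s ss => simp

-- run the first segment from a carried mid-stage state, then B's outer fold
def runFrom (t st lb : Int) : List (List String) → Int × Int
  | [] => (t + st, lb)
  | seg :: rest =>
    let r := seg.foldl (stageStep t) (st, lb)
    rest.foldl (fun s sg => runStage s.1 0 sg) (t + r.1, r.2)

theorem stepA_not_slash (t st lb : Int) (a : String) (ha : a ≠ "/") :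
    potStepA (t, st, lb) a = (t, stageStep t (st, lb) a) := by
  simp only [potStepA, stageStep, ha, ite_false]
  split_ifs <;> rfl

-- main invariant: A's loop from any mid-stage state = split-then-run
theorem mainLemma (h : List String) :
    ∀ (t st lb : Int),
      ((h.foldl potStepA (t, st, lb)).1 + (h.foldl potStepA (t, st, lb)).2.1,
        (h.foldl potStepA (t, st, lb)).2.2) = runFrom t st lb (splitS h) := by
  induction h with
  | nil => intro t st lb; simp [splitS, runFrom]
  | cons a rest ih =>
    intro t st lb
    by_cases ha : a = "/"
    · simp only [List.foldl_cons, ha, potStepA, splitS, reduceIte]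
      rw [ih (t + st) 0 0]
      cases hs : splitS rest with
      | nil => exact absurd hs (splitS_ne_nil rest)
      | cons s ss =>
        simp [runFrom, runStage]
    · simp only [List.foldl_cons, stepA_not_slash t st lb a ha, splitS, if_neg ha]
      rw [ih t (stageStep t (st, lb) a).1 (stageStep t (st, lb) a).2]
      cases hs : splitS rest with
      | nil => exact absurd hs (splitS_ne_nil rest)
      | cons s ss => simp [runFrom]

-- ===== VERDICT (by name: the statement is the Claim_ definition above) =====
theorem get_pot_size_py_spec : Claim_equal_get_pot_size_py := by
  intro history _
  show _ = get_pot_size_py_alt history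
  simp only [get_pot_size_py, get_pot_size_py_alt]
  rw [splitAcc_eq history [] []]
  cases hs : splitS history with
  | nil => exact absurd hs (splitS_ne_nil history)
  | cons s ss =>
    have hm := mainLemma history 0 4 0
    rw [hs] at hm
    simp only [List.nil_append] at hm ⊢
    rw [hm]
    simp only [runFrom, runStage, List.headD, List.tail_cons]
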